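-- pv_equiv track=rewrite | github.com/Mount1ssir/-0-1_Knapsack_Problem | 2_assignment/VNS/VNS.py | local_search_2flip
-- ===== SOURCE A (Python) =====
-- def get_weight(x, w):
--     return sum(w[i] * x[i] for i in range(len(x)))
--
-- def get_value(x, u):
--     return sum(u[i] * x[i] for i in range(len(x)))
--
-- def local_search_2flip(x, n, W, u, w):
--     x = list(x)
--     while True:
--         improvement = False
--         for i in range(n):
--             for j in range(i+1, n):
--                 y = list(x)
--                 y[i] = 1 - y[i]
--                 y[j] = 1 - y[j]
--                 if get_weight(y, w) <= W and get_value(y, u) > get_value(x, u):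
--                     x = y
--                     improvement = True
--                     break
--             if improvement: break
--         if not improvement: break
--     return x
-- ===== SOURCE B (Python) =====
-- def local_search_2flip(x, n, W, u, w):
--     # Flat candidate-pair list + first-match search with O(1) flip deltas and a
--     # running weight, instead of nested loops that copy and re-sum the whole
--     # candidate solution for every pair.
--     xs = list(x)
--     cw = sum(wi * xi for wi, xi in zip(w, xs))
--     pairs = [(i, j) for i in range(n) for j in range(i + 1, n)]
--     while True:
--         hit = next(((i, j) for (i, j) in pairs
--                     if cw + w[i] * (1 - 2 * xs[i]) + w[j] * (1 - 2 * xs[j]) <= W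
--                     and u[i] * (1 - 2 * xs[i]) + u[j] * (1 - 2 * xs[j]) > 0), None)
--         if hit is None:
--             return xs
--         i, j = hit
--         cw += w[i] * (1 - 2 * xs[i]) + w[j] * (1 - 2 * xs[j])
--         xs[i] = 1 - xs[i]
--         xs[j] = 1 - xs[j]
-- ===== Notes on version B (the rewrite author's own statement) =====
-- stated objective: faster
-- what changed: B precomputes the lexicographic candidate-pair list once and, per improvement step, finds the first improving pair by a single first-match scan scoring each pair with O(1) flip deltas against a running weight, instead of A's nested i/j loops with break flags that copy the solution and re-sum full weight and value for every candidate pair.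
-- outside the precondition, e.g. on local_search_2flip([0, 0], 2, 0, [], [5, 5]): A returns [0, 0], B returns [0, 0]; on local_search_2flip([0, 0], 2, 20, [], [5, 5]): A raises IndexError, B raises IndexError
import Mathlib
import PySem

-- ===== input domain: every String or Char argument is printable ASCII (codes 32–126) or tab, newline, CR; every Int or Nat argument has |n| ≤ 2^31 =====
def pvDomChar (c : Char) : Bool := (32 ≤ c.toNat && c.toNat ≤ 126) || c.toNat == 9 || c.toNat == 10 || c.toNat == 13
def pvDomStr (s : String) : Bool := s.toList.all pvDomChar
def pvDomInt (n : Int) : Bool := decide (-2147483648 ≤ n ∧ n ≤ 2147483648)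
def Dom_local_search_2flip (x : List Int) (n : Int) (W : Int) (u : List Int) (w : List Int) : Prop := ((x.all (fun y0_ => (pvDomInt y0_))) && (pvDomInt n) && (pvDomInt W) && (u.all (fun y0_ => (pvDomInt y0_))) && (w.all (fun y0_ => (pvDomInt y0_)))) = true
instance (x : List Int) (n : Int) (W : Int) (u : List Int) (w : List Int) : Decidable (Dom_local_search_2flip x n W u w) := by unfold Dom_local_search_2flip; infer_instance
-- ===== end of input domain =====

-- B replaces A's nested break-flag loops that copy and re-sum every candidate by one
-- precomputed pair list searched with O(1) flip deltas against a running weight;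
-- objective: faster per search pass. Both programs terminate because each accepted
-- flip strictly increases the value and at most 2^n states exist; the ports make
-- this explicit with a fuel of 2^n + 1, which is never exhausted.

-- ===== PORT A =====
-- sum(v[i] * x[i] for i in range(len(x)))  (get_weight / get_value; indices valid under Pre_)
def pvSum (x v : List Int) : Int :=
  (List.range x.length).foldl (fun s i => s + v.getD i 0 * x.getD i 0) 0

-- y = list(x); y[i] = 1 - y[i]; y[j] = 1 - y[j]
def pvFlip (x : List Int) (i j : Nat) : List Int :=
  let y1 := x.set i (1 - x.getD i 0)
  y1.set j (1 - y1.getD j 0)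

-- inner 'for j in range(i+1, n)' loop, returning the first improving neighbour
def pvInnerA (W : Int) (u w x : List Int) (i : Nat) : List Nat → Option (List Int)
  | [] => none
  | j :: js =>
    let y := pvFlip x i j
    if pvSum y w ≤ W ∧ pvSum x u < pvSum y u then some y
    else pvInnerA W u w x i js

-- outer 'for i in range(n)' loop
def pvOuterA (n : Nat) (W : Int) (u w x : List Int) : List Nat → Option (List Int)
  | [] => none
  | i :: is =>
    match pvInnerA W u w x i (List.range' (i + 1) (n - (i + 1))) with
    | some y => some y
    | none => pvOuterA n W u w x is

-- 'while True: … if not improvement: break'; fuel 2^n+1 bounds the improvement steps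
def pvLoopA (n : Nat) (W : Int) (u w : List Int) : Nat → List Int → List Int
  | 0, x => x
  | f + 1, x =>
    match pvOuterA n W u w x (List.range n) with
    | some y => pvLoopA n W u w f y
    | none => x

def local_search_2flip (x : List Int) (n : Int) (W : Int) (u : List Int) (w : List Int) : List Int :=
  pvLoopA n.toNat W u w (2 ^ n.toNat + 1) x

-- ===== PORT B =====
-- pairs = [(i, j) for i in range(n) for j in range(i+1, n)]
def pvPairs (n : Nat) : List (Nat × Nat) :=
  (List.range n).flatMap (fun i => (List.range' (i + 1) (n - (i + 1))).map (fun j => (i, j)))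

-- v[i]*(1-2*xs[i]) + v[j]*(1-2*xs[j]) : the O(1) delta of flipping the pair p
def pvDW (v xs : List Int) (p : Nat × Nat) : Int :=
  v.getD p.1 0 * (1 - 2 * xs.getD p.1 0) + v.getD p.2 0 * (1 - 2 * xs.getD p.2 0)

-- the condition of B's first-match generator
def pvImp (W : Int) (u w xs : List Int) (cw : Int) (p : Nat × Nat) : Bool :=
  decide (cw + pvDW w xs p ≤ W) && decide (0 < pvDW u xs p)

-- 'while True: hit = next(…, None); …'  — find? is B's single first-match scan
def pvLoopB (pairs : List (Nat × Nat)) (W : Int) (u w : List Int) : Nat → List Int × Int → List Int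
  | 0, (xs, _) => xs
  | f + 1, (xs, cw) =>
    match pairs.find? (pvImp W u w xs cw) with
    | none => xs
    | some p =>
      pvLoopB pairs W u w f
        ((xs.set p.1 (1 - xs.getD p.1 0)).set p.2
            (1 - (xs.set p.1 (1 - xs.getD p.1 0)).getD p.2 0),
         cw + pvDW w xs p)

-- cw = sum(wi * xi for wi, xi in zip(w, xs))
def local_search_2flip_alt (x : List Int) (n : Int) (W : Int) (u : List Int) (w : List Int) : List Int :=
  pvLoopB (pvPairs n.toNat) W u w (2 ^ n.toNat + 1)
    (x, (List.zip w x).foldl (fun s p => s + p.1 * p.2) 0)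

-- ===== PRECONDITION & SPEC =====
-- When n ≥ 2, Pre_ requires every index among 0..n-1 and 0..len(x)-1 to fall inside x, w
-- and u: outside that both programs usually raise IndexError, though on some such inputs
-- the weight test short-circuits before any out-of-range read and both return x unchanged
-- (see claim.json cites).
def Pre_local_search_2flip (x : List Int) (n : Int) (W : Int) (u : List Int) (w : List Int) : Prop :=
  n ≤ 1 ∨ (n ≤ (x.length : Int) ∧ x.length ≤ w.length ∧ x.length ≤ u.length)

instance (x : List Int) (n : Int) (W : Int) (u : List Int) (w : List Int) : Decidable (Pre_local_search_2flip x n W u w) := by unfold Pre_local_search_2flip; infer_instance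

def pvWitness_local_search_2flip : List Int × Int × Int × List Int × List Int :=
  ([0, 1, 0], 3, 6, [4, 1, 5], [3, 2, 4])

def Spec_local_search_2flip (x : List Int) (n : Int) (W : Int) (u : List Int) (w : List Int) (out : List Int) : Prop := out = local_search_2flip_alt x n W u w
instance (x : List Int) (n : Int) (W : Int) (u : List Int) (w : List Int) (out : List Int) : Decidable (Spec_local_search_2flip x n W u w out) := by unfold Spec_local_search_2flip; infer_instance

-- ===== CLAIM (what is proved, stated in full; the proofs are below) =====
def Claim_equal_local_search_2flip : Prop := ∀ (x : List Int) (n : Int) (W : Int) (u : List Int) (w : List Int), Dom_local_search_2flip x n W u w → Pre_local_search_2flip x n W u w → Spec_local_search_2flip x n W u w (local_search_2flip x n W u w)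

-- ===== LEMMAS AND PROOFS =====

theorem pv_foldl_range_add (f : Nat → Int) (n : Nat) :
    (List.range n).foldl (fun s k => s + f k) 0 = ∑ k ∈ Finset.range n, f k := by
  induction n with
  | zero => simp
  | succ m ih => rw [List.range_succ, List.foldl_append, Finset.sum_range_succ, ih]; rfl

theorem pvSum_set (v x : List Int) (i : Nat) (a : Int) (h : i < x.length) :
    pvSum (x.set i a) v = pvSum x v + v.getD i 0 * (a - x.getD i 0) := by
  unfold pvSum
  rw [List.length_set, pv_foldl_range_add, pv_foldl_range_add]
  have key : ∀ k ∈ Finset.range x.length,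
      v.getD k 0 * (x.set i a).getD k 0
        = v.getD k 0 * x.getD k 0 + (if k = i then v.getD i 0 * (a - x.getD i 0) else 0) := by
    intro k hk
    by_cases hki : k = i
    · subst hki
      have : (x.set k a).getD k 0 = a := by
        simp [List.getD, h]
      rw [this]; simp; ring
    · have : (x.set i a).getD k 0 = x.getD k 0 := by
        simp [List.getD, List.getElem?_set_ne (fun hh => hki hh.symm)]
      rw [this]; simp [hki]
  rw [Finset.sum_congr rfl key, Finset.sum_add_distrib]
  congr 1
  rw [Finset.sum_ite_eq' (Finset.range x.length) i (fun _ => v.getD i 0 * (a - x.getD i 0))]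
  simp [Finset.mem_range.mpr h]

theorem pvSum_flip (v x : List Int) (i j : Nat) (hij : i ≠ j)
    (hi : i < x.length) (hj : j < x.length) :
    pvSum (pvFlip x i j) v = pvSum x v + pvDW v x (i, j) := by
  show pvSum ((x.set i (1 - x.getD i 0)).set j (1 - (x.set i (1 - x.getD i 0)).getD j 0)) v = _
  unfold pvDW
  have hgj : (x.set i (1 - x.getD i 0)).getD j 0 = x.getD j 0 := by
    simp [List.getD, List.getElem?_set_ne hij]
  rw [hgj, pvSum_set v _ j _ (by simpa using hj), pvSum_set v x i _ hi, hgj]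
  ring

theorem pvFlip_length (x : List Int) (i j : Nat) : (pvFlip x i j).length = x.length := by
  simp [pvFlip]

-- Bool form of A's acceptance test for the pair (i, j)
def pvPredA (W : Int) (u w x : List Int) (p : Nat × Nat) : Bool :=
  decide (pvSum (pvFlip x p.1 p.2) w ≤ W ∧ pvSum x u < pvSum (pvFlip x p.1 p.2) u)

theorem pvInnerA_as_find (W : Int) (u w x : List Int) (i : Nat) (js : List Nat) :
    pvInnerA W u w x i js
      = ((js.map (fun j => (i, j))).find? (pvPredA W u w x)).map (fun p => pvFlip x p.1 p.2) := by
  induction js with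
  | nil => rfl
  | cons j js ih =>
    rw [pvInnerA, List.map_cons, List.find?_cons]
    by_cases hc : pvSum (pvFlip x i j) w ≤ W ∧ pvSum x u < pvSum (pvFlip x i j) u
    · rw [if_pos hc]
      have : pvPredA W u w x (i, j) = true := by simpa [pvPredA] using hc
      simp [this]
    · rw [if_neg hc]
      have : pvPredA W u w x (i, j) = false := by simpa [pvPredA] using hc
      simp [this, ih]

theorem pvOuterA_as_find (n : Nat) (W : Int) (u w x : List Int) (is : List Nat) :
    pvOuterA n W u w x is
      = ((is.flatMap (fun i => (List.range' (i + 1) (n - (i + 1))).map (fun j => (i, j)))).find?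
          (pvPredA W u w x)).map (fun p => pvFlip x p.1 p.2) := by
  induction is with
  | nil => rfl
  | cons i is ih =>
    rw [pvOuterA, List.flatMap_cons, List.find?_append, pvInnerA_as_find]
    cases h : (((List.range' (i + 1) (n - (i + 1))).map (fun j => (i, j))).find?
        (pvPredA W u w x)) with
    | some p => simp [h]
    | none => simp [h, ih]

theorem mem_pvPairs (n : Nat) (p : Nat × Nat) (h : p ∈ pvPairs n) : p.1 < p.2 ∧ p.2 < n := by
  simp only [pvPairs, List.mem_flatMap, List.mem_map, List.mem_range,
    List.mem_range'_1] at h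
  obtain ⟨i, hi, j, hj, rfl⟩ := h
  exact ⟨by omega, by omega⟩

theorem pv_find_congr {α : Type} (p q : α → Bool) (l : List α)
    (h : ∀ a ∈ l, p a = q a) : l.find? p = l.find? q := by
  induction l with
  | nil => rfl
  | cons a l ih =>
    rw [List.find?_cons, List.find?_cons, h a (List.mem_cons_self ..)]
    cases q a
    · exact ih (fun b hb => h b (List.mem_cons_of_mem _ hb))
    · rfl

theorem pvImp_eq_predA (n : Nat) (W : Int) (u w x : List Int) (hn : n ≤ x.length)
    (hwl : x.length ≤ w.length) (hul : x.length ≤ u.length) :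
    ∀ p ∈ pvPairs n, pvImp W u w x (pvSum x w) p = pvPredA W u w x p := by
  intro p hp
  obtain ⟨hij, hjn⟩ := mem_pvPairs n p hp
  have hi : p.1 < x.length := by omega
  have hj : p.2 < x.length := by omega
  have hwq := pvSum_flip w x p.1 p.2 (by omega) hi hj
  have huq := pvSum_flip u x p.1 p.2 (by omega) hi hj
  unfold pvImp pvPredA
  rw [hwq, huq]
  by_cases h1 : pvSum x w + pvDW w x (p.1, p.2) ≤ W <;>
    by_cases h2 : 0 < pvDW u x (p.1, p.2) <;>
      simp_all

theorem pvOuterA_range_as_find (n : Nat) (W : Int) (u w x : List Int) :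
    pvOuterA n W u w x (List.range n)
      = ((pvPairs n).find? (pvPredA W u w x)).map (fun p => pvFlip x p.1 p.2) :=
  pvOuterA_as_find n W u w x (List.range n)

theorem pvLoop_eq (n : Nat) (W : Int) (u w : List Int) (f : Nat) (x : List Int)
    (hn : n ≤ x.length) (hwl : x.length ≤ w.length) (hul : x.length ≤ u.length) :
    pvLoopB (pvPairs n) W u w f (x, pvSum x w) = pvLoopA n W u w f x := by
  induction f generalizing x with
  | zero => rfl
  | succ f ih =>
    rw [pvLoopA, pvLoopB, pvOuterA_range_as_find,
      pv_find_congr _ _ _ (pvImp_eq_predA n W u w x hn hwl hul)]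
    cases h : (pvPairs n).find? (pvPredA W u w x) with
    | none => rfl
    | some p =>
      have hp := mem_pvPairs n p (List.mem_of_find?_eq_some h)
      have hflip := pvSum_flip w x p.1 p.2 (by omega) (by omega) (by omega)
      show pvLoopB (pvPairs n) W u w f (pvFlip x p.1 p.2, pvSum x w + pvDW w x (p.1, p.2))
            = pvLoopA n W u w f (pvFlip x p.1 p.2)
      rw [← hflip]
      exact ih (pvFlip x p.1 p.2) (by rw [pvFlip_length]; exact hn)
        (by rw [pvFlip_length]; exact hwl) (by rw [pvFlip_length]; exact hul)

theorem pvLoopB_nil (W : Int) (u w : List Int) (f : Nat) (x : List Int) (cw : Int) :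
    pvLoopB [] W u w f (x, cw) = x := by
  cases f with
  | zero => rfl
  | succ f => rfl

theorem pvOuterA_none_of_le_one (n : Nat) (W : Int) (u w x : List Int) (hn : n ≤ 1) :
    pvOuterA n W u w x (List.range n) = none := by
  interval_cases n
  · rfl
  · simp [List.range_one, pvOuterA, pvInnerA]

theorem pvPairs_nil_of_le_one (n : Nat) (hn : n ≤ 1) : pvPairs n = [] := by
  interval_cases n
  · rfl
  · rfl

theorem pvLoopA_le_one (n : Nat) (W : Int) (u w : List Int) (f : Nat) (x : List Int)
    (hn : n ≤ 1) : pvLoopA n W u w f x = x := by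
  cases f with
  | zero => rfl
  | succ f => rw [pvLoopA, pvOuterA_none_of_le_one n W u w x hn]

theorem pvZipSum_eq (w x : List Int) (h : x.length ≤ w.length) :
    (List.zip w x).foldl (fun s p => s + p.1 * p.2) 0 = pvSum x w := by
  induction x generalizing w with
  | nil => simp [pvSum]
  | cons a x ih =>
    cases w with
    | nil => simp at h
    | cons b w =>
      have hx : pvSum (a :: x) (b :: w) = b * a + pvSum x w := by
        unfold pvSum
        rw [pv_foldl_range_add, pv_foldl_range_add, List.length_cons,
          Finset.sum_range_succ']
        simp [add_comm]
      rw [hx, List.zip_cons_cons, List.foldl_cons, PySem.List.foldl_add,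
        ← ih w (by simpa using h), PySem.List.foldl_add]
      ring

-- ===== VERDICT (by name: the statement is the Claim_ definition above) =====
theorem local_search_2flip_spec : Claim_equal_local_search_2flip := by
  intro x n W u w _ hpre
  unfold Spec_local_search_2flip local_search_2flip local_search_2flip_alt
  by_cases h1 : n.toNat ≤ 1
  · rw [pvLoopA_le_one _ _ _ _ _ _ h1, pvPairs_nil_of_le_one _ h1, pvLoopB_nil]
  · obtain ⟨hn, hw, hu⟩ := hpre.resolve_left (by omega)
    rw [pvZipSum_eq w x hw]
    exact (pvLoop_eq n.toNat W u w (2 ^ n.toNat + 1) x (by omega) hw hu).symm
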